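-- pv_equiv track=rewrite | github.com/funai/calibre-rename | calibre_rename/main.py | shorten_to_bytes_width
-- ===== SOURCE A (Python) =====
-- _ELLIP = '_'
--
-- _MIN_WIDTH = len(_ELLIP.encode())
--
-- def shorten_to_bytes_width(text: str, width: int) -> str:
-- 	clipped = False
-- 	text = " ".join(text.split()) # reduce multiple spaces
-- 	# Ref: https://stackoverflow.com/a/56401167/
-- 	width = max(_MIN_WIDTH, width)	# This prevents ValueError if width < _MIN_WIDTH
-- 	while (len(text.encode()) + _MIN_WIDTH) > width:
-- 		clipped = True
-- 		text = text[:-1].strip()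
-- 	assert (len(text.encode()) + _MIN_WIDTH) <= width
-- 	if clipped:
-- 		return text + _ELLIP
-- 	else:
-- 		return text
-- ===== SOURCE B (Python) =====
-- _ELLIP = '_'
--
-- _MIN_WIDTH = len(_ELLIP.encode())
--
-- def shorten_to_bytes_width(text: str, width: int) -> str:
-- 	# Closed form: no shrinking loop. The normalized text has single spaces only,
-- 	# so the clipped result is just the rstripped prefix that leaves room for the ellipsis.
-- 	text = " ".join(text.split())
-- 	width = max(_MIN_WIDTH, width)
-- 	if len(text.encode()) + _MIN_WIDTH <= width:
-- 		return text
-- 	keep = width - _MIN_WIDTH  # bytes of text we may keep (ASCII: bytes == chars)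
-- 	return text[:keep].rstrip() + _ELLIP
-- ===== Notes on version B (the rewrite author's own statement) =====
-- stated objective: faster
-- what changed: B replaces A's while-loop that repeatedly chops one character and re-strips (re-encoding the string each pass) by a closed-form answer: if the normalized text fits, return it, otherwise return the rstripped (width-1)-byte prefix plus the ellipsis.
import Mathlib
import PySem

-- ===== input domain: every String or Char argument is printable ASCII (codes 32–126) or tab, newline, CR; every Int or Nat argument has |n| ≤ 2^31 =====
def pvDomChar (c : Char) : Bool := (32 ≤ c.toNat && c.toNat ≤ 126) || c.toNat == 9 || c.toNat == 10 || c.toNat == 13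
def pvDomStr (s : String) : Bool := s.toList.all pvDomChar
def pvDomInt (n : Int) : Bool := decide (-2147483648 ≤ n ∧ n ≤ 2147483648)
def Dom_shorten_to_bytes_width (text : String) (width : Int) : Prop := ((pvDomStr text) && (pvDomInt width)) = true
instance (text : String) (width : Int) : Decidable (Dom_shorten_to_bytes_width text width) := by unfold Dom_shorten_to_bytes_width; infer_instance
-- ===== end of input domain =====

-- B replaces A's O(n^2) character-by-character shrinking loop by a closed-form slice:
-- the clipped result is the rstripped (width-1)-byte prefix of the normalized text.
-- On the ASCII domain Dom, len(text.encode()) = len(text); both ports use the character length there (exact on Dom).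

-- ===== PORT A =====
def pvEllipA : List Char := ['_']          -- _ELLIP = '_'
def pvMinWidthA : Int := 1                 -- _MIN_WIDTH = len(_ELLIP.encode()) = 1 (ASCII)

-- the while loop of A; fuel = initial length + 1 suffices (each pass shortens the text)
def pvWhileA (fuel : Nat) (clipped : Bool) (t : List Char) (w : Int) : Bool × List Char :=
  match fuel with
  | 0 => (clipped, t)
  | f + 1 =>
    if (t.length : Int) + pvMinWidthA > w then
      pvWhileA f true (PySem.Chars.strip (PySem.Chars.slice t none (some (-1)))) w
    else (clipped, t)

def shorten_to_bytes_width (text : String) (width : Int) : String :=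
  let t := PySem.Chars.join [' '] (PySem.Chars.split₀ text.toList)  -- " ".join(text.split())
  let w := max pvMinWidthA width
  let r := pvWhileA (t.length + 1) false t w
  -- the assert always holds (see the loop lemma below)
  if r.1 then String.mk (r.2 ++ pvEllipA) else String.mk r.2

-- ===== PORT B =====
def pvEllipB : List Char := ['_']
def pvMinWidthB : Int := 1

def shorten_to_bytes_width_alt (text : String) (width : Int) : String :=
  let t := PySem.Chars.join [' '] (PySem.Chars.split₀ text.toList)
  let w := max pvMinWidthB width
  if (t.length : Int) + pvMinWidthB ≤ w then String.mk t
  else String.mk (PySem.Chars.rstrip (PySem.Chars.slice t none (some (w - pvMinWidthB))) ++ pvEllipB)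

-- ===== PRECONDITION & SPEC =====
def Spec_shorten_to_bytes_width (text : String) (width : Int) (out : String) : Prop := out = shorten_to_bytes_width_alt text width
instance (text : String) (width : Int) (out : String) : Decidable (Spec_shorten_to_bytes_width text width out) := by unfold Spec_shorten_to_bytes_width; infer_instance

-- ===== CLAIM (what is proved, stated in full; the proofs are below) =====
def Claim_equal_shorten_to_bytes_width : Prop := ∀ (text : String) (width : Int), Dom_shorten_to_bytes_width text width → Spec_shorten_to_bytes_width text width (shorten_to_bytes_width text width)

-- ===== LEMMAS AND PROOFS =====

-- properties of the normalized text (" ".join(text.split())): first and last characters are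
-- not whitespace and no two adjacent characters are both whitespace
def pvHeadOK (t : List Char) : Prop := ∀ c, t.head? = some c → PySem.Chars.isspace c = false
def pvLastOK (t : List Char) : Prop := ∀ c, t.getLast? = some c → PySem.Chars.isspace c = false
def pvNoTwo : List Char → Prop
  | a :: b :: r => ¬(PySem.Chars.isspace a = true ∧ PySem.Chars.isspace b = true) ∧ pvNoTwo (b :: r)
  | _ => True

def pvWordOK (w : List Char) : Prop := w ≠ [] ∧ ∀ c ∈ w, PySem.Chars.isspace c = false

lemma pvNoTwo_cons (a : Char) (l : List Char) (h : pvNoTwo (a :: l)) : pvNoTwo l := by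
  cases l with
  | nil => trivial
  | cons b r => exact h.2

lemma pvHeadOK_take (t : List Char) (k : Nat) (h : pvHeadOK t) : pvHeadOK (t.take k) := by
  intro c hc
  apply h
  cases t with
  | nil => simp at hc
  | cons a r =>
    cases k with
    | zero => simp at hc
    | succ k' => simpa using hc

lemma pvNoTwo_take (t : List Char) (h : pvNoTwo t) : ∀ k, pvNoTwo (t.take k) := by
  induction t with
  | nil => intro k; simp [pvNoTwo]
  | cons a r ih =>
    intro k
    cases k with
    | zero => trivial
    | succ k' =>
      cases r with
      | nil => cases k' <;> trivial
      | cons b r' =>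
        cases k' with
        | zero => trivial
        | succ k'' =>
          refine ⟨h.1, ?_⟩
          have := ih h.2 (k'' + 1)
          simpa using this

lemma pvNoTwo_last_pair (x : List Char) (b c : Char) (h : pvNoTwo (x ++ [b, c])) :
    ¬(PySem.Chars.isspace b = true ∧ PySem.Chars.isspace c = true) := by
  induction x with
  | nil => exact h.1
  | cons a x' ih => exact ih (pvNoTwo_cons a _ (by simpa using h))

lemma pv_mem_of_head? (l : List Char) (c : Char) (h : l.head? = some c) : c ∈ l := by
  cases l with
  | nil => simp at h
  | cons a r => simp at h; simp [h]

lemma pv_mem_of_getLast? (l : List Char) (c : Char) (h : l.getLast? = some c) : c ∈ l := by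
  rw [← List.head?_reverse] at h
  have := pv_mem_of_head? l.reverse c h
  simpa using this

lemma pv_lstrip_of_headOK (t : List Char) (h : pvHeadOK t) : PySem.Chars.lstrip t = t := by
  cases t with
  | nil => rfl
  | cons a r =>
    have ha : PySem.Chars.isspace a = false := h a (by simp)
    simp [PySem.Chars.lstrip, ha]

lemma pv_rstrip_of_lastOK (t : List Char) (h : pvLastOK t) : PySem.Chars.rstrip t = t := by
  rcases hrev : t.reverse with _ | ⟨c, r⟩
  · have : t = [] := by simpa using congrArg List.reverse hrev
    subst this; rfl
  · have hc : t.getLast? = some c := by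
      rw [← List.head?_reverse, hrev]; rfl
    have := h c hc
    simp [PySem.Chars.rstrip, hrev, this]
    have := congrArg List.reverse hrev
    simpa using this.symm

-- rstrip of a normalized prefix: it is a prefix, removes at most one character, and ends non-whitespace
lemma pv_rstrip_norm (u : List Char) (hh : pvHeadOK u) (hn : pvNoTwo u) :
    ∃ m, PySem.Chars.rstrip u = u.take m ∧ pvLastOK (PySem.Chars.rstrip u) ∧
      u.length ≤ m + 1 ∧ m ≤ u.length := by
  rcases hrev : u.reverse with _ | ⟨c, r⟩
  · have hu : u = [] := by simpa using congrArg List.reverse hrev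
    subst hu
    exact ⟨0, rfl, by intro c hc; simp [PySem.Chars.rstrip] at hc, by simp, by simp⟩
  · have hu : u = r.reverse ++ [c] := by
      have := congrArg List.reverse hrev
      simpa using this
    by_cases hc : PySem.Chars.isspace c = true
    · -- last char is whitespace: rstrip removes exactly it
      cases r with
      | nil =>
        exfalso
        have hu1 : u = [c] := by simpa using hu
        have := hh c (by simp [hu1])
        simp [hc] at this
      | cons b r' =>
        have hb : PySem.Chars.isspace b = false := by
          have hpair := pvNoTwo_last_pair r'.reverse b c (by
            have h2 : u = r'.reverse ++ [b, c] := by simpa using hu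
            rwa [h2] at hn)
          by_contra hb'
          exact hpair ⟨by simpa using hb', hc⟩
        have hres : PySem.Chars.rstrip u = (b :: r').reverse := by
          simp [PySem.Chars.rstrip, hrev, hc, hb]
        refine ⟨u.length - 1, ?_, ?_, by omega, by omega⟩
        · rw [hres]
          have h2 : u = (r'.reverse ++ [b]) ++ [c] := by
            rw [hu]; simp
          rw [h2]
          have h3 : ((r'.reverse ++ [b]) ++ [c]).length - 1 = (r'.reverse ++ [b]).length := by simp
          rw [h3, List.take_left]
          simp
        · rw [hres]
          intro d hd
          have h4 : ((b :: r').reverse : List Char).getLast? = some b := by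
            rw [← List.head?_reverse]; simp
          rw [h4] at hd
          cases hd; exact hb
    · -- last char not whitespace: rstrip is the identity
      have hres : PySem.Chars.rstrip u = u := by
        simp [PySem.Chars.rstrip, hrev, hc]
        have := congrArg List.reverse hrev
        simpa using this.symm
      refine ⟨u.length, by simp [hres], ?_, by omega, le_refl _⟩
      rw [hres]
      intro d hd
      have h5 : u.getLast? = some c := by rw [← List.head?_reverse, hrev]; rfl
      rw [h5] at hd; cases hd
      simpa using hc

lemma pvNoTwo_of_all (w : List Char) (h : ∀ c ∈ w, PySem.Chars.isspace c = false) : pvNoTwo w := by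
  induction w with
  | nil => trivial
  | cons a r ih =>
    cases r with
    | nil => trivial
    | cons b r' =>
      refine ⟨?_, ih (fun c hc => h c (by simp [hc]))⟩
      rintro ⟨_, hb⟩
      have := h b (by simp)
      simp [this] at hb

lemma pvHeadOK_append_left (x y : List Char) (hx : x ≠ []) (h : pvHeadOK x) : pvHeadOK (x ++ y) := by
  intro c hc
  cases x with
  | nil => exact absurd rfl hx
  | cons a r => simp at hc; exact h c (by simp [hc])

lemma pvLastOK_append_right (x y : List Char) (hy : y ≠ []) (h : pvLastOK y) : pvLastOK (x ++ y) := by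
  intro c hc
  apply h
  rcases List.eq_nil_or_concat y with h0 | ⟨ys, a, rfl⟩
  · exact absurd h0 hy
  · simp only [List.concat_eq_append, ← List.append_assoc] at hc
    simp only [List.concat_eq_append]
    rw [List.getLast?_concat] at hc ⊢
    exact hc

lemma pvNoTwo_append (x y : List Char) (hx : pvNoTwo x) (hy : pvNoTwo y)
    (hb : ∀ a b, x.getLast? = some a → y.head? = some b →
      ¬(PySem.Chars.isspace a = true ∧ PySem.Chars.isspace b = true)) :
    pvNoTwo (x ++ y) := by
  induction x with
  | nil => simpa using hy
  | cons a x' ih =>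
    cases x' with
    | nil =>
      cases y with
      | nil => trivial
      | cons b r => exact ⟨hb a b (by simp) (by simp), hy⟩
    | cons a' x'' =>
      refine ⟨hx.1, ?_⟩
      exact ih hx.2 (fun p q hp hq => hb p q (by rw [← hp]; simp) hq)

-- words produced by split() are nonempty and whitespace-free
lemma pv_split_go_ok : ∀ (s cur : List Char) (acc : List (List Char)),
    (∀ c ∈ cur, PySem.Chars.isspace c = false) →
    (∀ w ∈ acc, pvWordOK w) →
    ∀ w ∈ PySem.Chars.split₀.go s cur acc, pvWordOK w := by
  intro s
  induction s with
  | nil =>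
    intro cur acc hcur hacc w hw
    by_cases h : cur.isEmpty
    · rw [PySem.Chars.split₀.go] at hw
      simp [h] at hw
      exact hacc w hw
    · rw [PySem.Chars.split₀.go] at hw
      simp [h] at hw
      rcases hw with hw | hw
      · exact hacc w hw
      · subst hw
        refine ⟨?_, fun c hc => hcur c (by simpa using hc)⟩
        intro h0
        have : cur = [] := by simpa using congrArg List.reverse h0
        simp [this] at h
  | cons c rest ih =>
    intro cur acc hcur hacc w hw
    rw [PySem.Chars.split₀.go] at hw
    by_cases hsp : PySem.Chars.isspace c = true
    · by_cases hemp : cur.isEmpty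
      · simp [hsp, hemp] at hw
        exact ih [] acc (by simp) hacc w hw
      · simp [hsp, hemp] at hw
        refine ih [] (cur.reverse :: acc) (by simp) ?_ w hw
        intro v hv
        rcases List.mem_cons.mp hv with hv | hv
        · subst hv
          refine ⟨?_, fun d hd => hcur d (by simpa using hd)⟩
          intro h0
          have : cur = [] := by simpa using congrArg List.reverse h0
          simp [this] at hemp
        · exact hacc v hv
    · simp [hsp] at hw
      refine ih (c :: cur) acc ?_ hacc w hw
      intro d hd
      rcases List.mem_cons.mp hd with hd | hd
      · subst hd; simpa using hsp
      · exact hcur d hd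

lemma pv_intercalate_cons_cons (sep a b : List Char) (l : List (List Char)) :
    List.intercalate sep (a :: b :: l) = a ++ (sep ++ List.intercalate sep (b :: l)) := by
  simp [List.intercalate, List.intersperse]

-- the normalized text is "good"
lemma pv_join_good : ∀ (ws : List (List Char)), (∀ w ∈ ws, pvWordOK w) →
    pvHeadOK (PySem.Chars.join [' '] ws) ∧ pvLastOK (PySem.Chars.join [' '] ws) ∧
      pvNoTwo (PySem.Chars.join [' '] ws) ∧ (ws ≠ [] → PySem.Chars.join [' '] ws ≠ []) := by
  intro ws
  induction ws with
  | nil =>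
    intro _
    refine ⟨?_, ?_, ?_, by intro h; exact absurd rfl h⟩
    · intro c hc; simp [PySem.Chars.join, List.intercalate] at hc
    · intro c hc; simp [PySem.Chars.join, List.intercalate] at hc
    · simp [PySem.Chars.join, List.intercalate]; trivial
  | cons w rest ih =>
    intro h
    have hw := h w (by simp)
    have hrest : ∀ v ∈ rest, pvWordOK v := fun v hv => h v (by simp [hv])
    cases rest with
    | nil =>
      have hjoin : PySem.Chars.join [' '] [w] = w := by simp [PySem.Chars.join, List.intercalate]
      rw [hjoin]
      refine ⟨?_, ?_, pvNoTwo_of_all w hw.2, fun _ => hw.1⟩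
      · intro c hc; exact hw.2 c (pv_mem_of_head? _ _ hc)
      · intro c hc; exact hw.2 c (pv_mem_of_getLast? _ _ hc)
    | cons w2 rest2 =>
      obtain ⟨ihh, ihl, ihn, ihne⟩ := ih hrest
      have hne' : PySem.Chars.join [' '] (w2 :: rest2) ≠ [] := ihne (by simp)
      have hjoin : PySem.Chars.join [' '] (w :: w2 :: rest2) =
          w ++ (' ' :: PySem.Chars.join [' '] (w2 :: rest2)) := by
        simp [PySem.Chars.join, pv_intercalate_cons_cons]
      rw [hjoin]
      have hwhead : pvHeadOK w := fun c hc => hw.2 c (pv_mem_of_head? _ _ hc)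
      have hwlast : pvLastOK w := fun c hc => hw.2 c (pv_mem_of_getLast? _ _ hc)
      refine ⟨pvHeadOK_append_left _ _ hw.1 hwhead, ?_, ?_, by simp⟩
      · apply pvLastOK_append_right _ _ (by simp)
        have : (' ' :: PySem.Chars.join [' '] (w2 :: rest2) : List Char) =
            [' '] ++ PySem.Chars.join [' '] (w2 :: rest2) := by simp
        rw [this]
        exact pvLastOK_append_right _ _ hne' ihl
      · apply pvNoTwo_append _ _ (pvNoTwo_of_all w hw.2) ?_ ?_
        · rcases hs : PySem.Chars.join [' '] (w2 :: rest2) with _ | ⟨d, s'⟩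
          · exact absurd hs hne'
          · refine ⟨?_, by rw [← hs]; exact ihn⟩
            rintro ⟨_, hd⟩
            have := ihh d (by rw [hs]; rfl)
            simp [this] at hd
        · intro a b ha hb
          rintro ⟨ha', _⟩
          have := hwlast a ha
          simp [this] at ha'

-- A's while loop computes B's closed form on "good" text
lemma pv_loop_eq : ∀ (fuel : Nat) (t : List Char) (clipped : Bool) (w : Int),
    t.length ≤ fuel → 1 ≤ w → pvHeadOK t → pvLastOK t → pvNoTwo t →
    pvWhileA fuel clipped t w =
      ((if (t.length : Int) + 1 ≤ w then clipped else true),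
       PySem.Chars.rstrip (t.take (w - 1).toNat)) := by
  intro fuel
  induction fuel with
  | zero =>
    intro t clipped w hf hw hh hl hn
    have ht : t = [] := List.length_eq_zero_iff.mp (Nat.le_zero.mp hf)
    subst ht
    rw [pvWhileA, if_pos (by simp; omega)]
    simp [PySem.Chars.rstrip]
  | succ f ih =>
    intro t clipped w hf hw hh hl hn
    by_cases hcond : (t.length : Int) + pvMinWidthA > w
    · have hcond1 : (t.length : Int) + 1 > w := by simpa [pvMinWidthA] using hcond
      have hn1 : 1 ≤ t.length := by omega
      rw [pvWhileA, if_pos hcond]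
      have hslice : PySem.Chars.slice t none (some (-1)) = t.dropLast := by
        simp [PySem.Chars.slice_eq_listSlice, PySem.List.slice_to_neg_one]
      rw [hslice]
      have hdrop : t.dropLast = t.take (t.length - 1) := List.dropLast_eq_take
      have hh' : pvHeadOK t.dropLast := by rw [hdrop]; exact pvHeadOK_take _ _ hh
      have hn' : pvNoTwo t.dropLast := by rw [hdrop]; exact pvNoTwo_take _ hn _
      have hstrip : PySem.Chars.strip t.dropLast = PySem.Chars.rstrip t.dropLast := by
        simp [PySem.Chars.strip, pv_lstrip_of_headOK _ hh']
      rw [hstrip]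
      obtain ⟨m, hm, hlast', hlen1, hlen2⟩ := pv_rstrip_norm t.dropLast hh' hn'
      have hdl : t.dropLast.length = t.length - 1 := by simp
      have hlen' : (PySem.Chars.rstrip t.dropLast).length = m := by
        rw [hm, List.length_take]; omega
      have hfle : (PySem.Chars.rstrip t.dropLast).length ≤ f := by omega
      have hh'' : pvHeadOK (PySem.Chars.rstrip t.dropLast) := by
        rw [hm]; exact pvHeadOK_take _ _ hh'
      have hn'' : pvNoTwo (PySem.Chars.rstrip t.dropLast) := by
        rw [hm]; exact pvNoTwo_take _ hn' _
      rw [ih _ true w hfle hw hh'' hlast' hn'']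
      have hflag : (if ((PySem.Chars.rstrip t.dropLast).length : Int) + 1 ≤ w then true else true) = true := by
        simp
      rw [hflag, if_neg (by omega)]
      have hkcast : (((w - 1).toNat : Int)) = w - 1 := Int.toNat_of_nonneg (by omega)
      have hk : (w - 1).toNat ≤ t.length - 1 := by omega
      by_cases hkm : (w - 1).toNat ≤ m
      · have e1 : (PySem.Chars.rstrip t.dropLast).take (w - 1).toNat = t.take (w - 1).toNat := by
          rw [hm, List.take_take, min_eq_left hkm, hdrop, List.take_take, min_eq_left hk]
        rw [e1]
      · have hk2 : (w - 1).toNat = t.dropLast.length := by omega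
        have e2 : (PySem.Chars.rstrip t.dropLast).take (w - 1).toNat = PySem.Chars.rstrip t.dropLast :=
          List.take_of_length_le (by omega)
        have e3 : t.take (w - 1).toNat = t.dropLast := by rw [hk2, hdl, ← hdrop]
        rw [e2, e3, pv_rstrip_of_lastOK _ hlast']
    · have hle : (t.length : Int) + 1 ≤ w := by simp [pvMinWidthA] at hcond; omega
      rw [pvWhileA, if_neg hcond, if_pos hle]
      have e : t.take (w - 1).toNat = t := List.take_of_length_le (by omega)
      rw [e, pv_rstrip_of_lastOK _ hl]

-- the two ports, after unfolding, on the shared normalized text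
lemma pv_main_core (t : List Char) (width : Int)
    (hh : pvHeadOK t) (hl : pvLastOK t) (hn : pvNoTwo t) :
    (if (pvWhileA (t.length + 1) false t (max pvMinWidthA width)).1 = true
       then String.mk ((pvWhileA (t.length + 1) false t (max pvMinWidthA width)).2 ++ pvEllipA)
       else String.mk (pvWhileA (t.length + 1) false t (max pvMinWidthA width)).2)
    = (if (t.length : Int) + pvMinWidthB ≤ max pvMinWidthB width then String.mk t
       else String.mk (PySem.Chars.rstrip (PySem.Chars.slice t none (some (max pvMinWidthB width - pvMinWidthB))) ++ pvEllipB)) := by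
  have hw : (1 : Int) ≤ max pvMinWidthA width := by simp [pvMinWidthA]
  rw [pv_loop_eq _ _ false (max pvMinWidthA width) (Nat.le_succ _) hw hh hl hn]
  have heq : max pvMinWidthB width = max pvMinWidthA width := rfl
  by_cases hfit : (t.length : Int) + 1 ≤ max pvMinWidthA width
  · rw [if_pos hfit]
    have hfit' : (t.length : Int) + pvMinWidthB ≤ max pvMinWidthB width := hfit
    rw [if_pos hfit']
    have e : t.take (max pvMinWidthA width - 1).toNat = t := by
      apply List.take_of_length_le
      have hk : (((max pvMinWidthA width - 1).toNat : Int)) = max pvMinWidthA width - 1 :=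
        Int.toNat_of_nonneg (by omega)
      omega
    rw [e, pv_rstrip_of_lastOK _ hl]
    rfl
  · rw [if_neg hfit]
    have hfit' : ¬ ((t.length : Int) + pvMinWidthB ≤ max pvMinWidthB width) := hfit
    rw [if_neg hfit']
    have hslice : PySem.Chars.slice t none (some (max pvMinWidthB width - pvMinWidthB))
        = t.take (max pvMinWidthA width - 1).toNat := by
      rw [PySem.Chars.slice_eq_listSlice]
      have h2 : max pvMinWidthB width - pvMinWidthB = max pvMinWidthA width - 1 := by
        simp [pvMinWidthA, pvMinWidthB]
      rw [h2]
      exact PySem.List.slice_to _ (by simp [pvMinWidthA])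
    rw [hslice]
    rfl

-- ===== VERDICT (by name: the statement is the Claim_ definition above) =====
theorem shorten_to_bytes_width_spec : Claim_equal_shorten_to_bytes_width := by
  intro text width _hdom
  unfold Spec_shorten_to_bytes_width shorten_to_bytes_width shorten_to_bytes_width_alt
  have hwords : ∀ w ∈ PySem.Chars.split₀ text.toList, pvWordOK w := by
    have h0 : PySem.Chars.split₀ text.toList = PySem.Chars.split₀.go text.toList [] [] := rfl
    rw [h0]
    exact pv_split_go_ok text.toList [] [] (by simp) (by simp)
  obtain ⟨hh, hl, hn, _⟩ := pv_join_good _ hwords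
  exact pv_main_core _ width hh hl hn
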